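-- pv_equiv track=rewrite | github.com/anvar-front/Algorithms | Saliev/functions.py | txt_to_matrix
-- ===== SOURCE A (Python) =====
-- def txt_to_matrix(txt, key_length):     # Текст -> матрицу
--     x = []
--     for i in txt.upper():
--         x.append(ord(i) - 65)
--     y = [x[i:key_length + i] for i in range(0, len(x), key_length)]
--     for j in y:
--         if len(j) < key_length:
--             for i in range(key_length - len(j)):
--                 j.append(0)
--     return y
-- ===== SOURCE B (Python) =====
-- def txt_to_matrix(txt, key_length):     # Текст -> матрицу
--     if key_length < 1:
--         return []
--     rows = []
--     row = []
--     for c in txt.upper():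
--         row.append(ord(c) - 65)
--         if len(row) == key_length:
--             rows.append(row)
--             row = []
--     if row:
--         row += [0] * (key_length - len(row))
--         rows.append(row)
--     return rows
-- ===== Notes on version B (the rewrite author's own statement) =====
-- stated objective: alternative
-- what changed: Replaces A's staged construction (build flat code list, slice it into rows by index range, then pad each short row in inner loops) with a single streaming pass over the characters that grows a current-row accumulator, flushes it each time it fills, and pads only the final partial row; no flat list, no slicing, no index arithmetic.
import Mathlib
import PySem

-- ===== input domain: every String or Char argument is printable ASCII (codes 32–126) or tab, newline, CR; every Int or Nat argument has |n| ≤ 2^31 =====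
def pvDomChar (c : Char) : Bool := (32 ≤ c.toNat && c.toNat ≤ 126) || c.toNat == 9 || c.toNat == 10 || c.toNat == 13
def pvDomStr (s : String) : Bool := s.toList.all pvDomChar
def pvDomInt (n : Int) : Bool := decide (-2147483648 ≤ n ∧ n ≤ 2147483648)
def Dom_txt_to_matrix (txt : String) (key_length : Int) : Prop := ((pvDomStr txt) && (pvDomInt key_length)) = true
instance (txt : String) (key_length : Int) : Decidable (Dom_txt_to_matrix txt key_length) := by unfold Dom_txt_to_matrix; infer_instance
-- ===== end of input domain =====

-- B replaces A's staged build-flat-list / slice-by-index / pad-short-rows construction with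
-- one streaming pass over the characters, flushing a current-row accumulator when it fills.

-- ===== PORT A =====
def txt_to_matrix (txt : String) (key_length : Int) : List (List Int) :=
  let x : List Int :=
    (PySem.Str.upper txt).toList.foldl (fun acc c => acc ++ [((c.toNat : Int) - 65)]) []
  let y : List (List Int) :=
    (PySem.List.pyRange 0 (x.length : Int) key_length).map
      (fun i => PySem.List.slice x (some i) (some (key_length + i)))
  y.map (fun j =>
    if (j.length : Int) < key_length then
      (PySem.List.pyRange 0 (key_length - (j.length : Int)) 1).foldl
        (fun jj _ => jj ++ [(0 : Int)]) j
    else j)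

-- ===== PORT B =====
def txt_to_matrix_alt (txt : String) (key_length : Int) : List (List Int) :=
  if key_length < 1 then []
  else
    let st : List (List Int) × List Int :=
      (PySem.Str.upper txt).toList.foldl
        (fun (s : List (List Int) × List Int) c =>
          let row' := s.2 ++ [((c.toNat : Int) - 65)]
          if (row'.length : Int) = key_length then (s.1 ++ [row'], []) else (s.1, row'))
        ([], [])
    if st.2 = [] then st.1
    else st.1 ++ [st.2 ++ List.replicate (key_length - (st.2.length : Int)).toNat (0 : Int)]

-- ===== PRECONDITION & SPEC =====
-- A raises ValueError (range step 0) when key_length = 0; that single value is excluded.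
def Pre_txt_to_matrix (txt : String) (key_length : Int) : Prop := key_length ≠ 0
instance (txt : String) (key_length : Int) : Decidable (Pre_txt_to_matrix txt key_length) := by
  unfold Pre_txt_to_matrix; infer_instance
def pvWitness_txt_to_matrix : String × Int := ("HELLO", 3)

def Spec_txt_to_matrix (txt : String) (key_length : Int) (out : List (List Int)) : Prop := out = txt_to_matrix_alt txt key_length
instance (txt : String) (key_length : Int) (out : List (List Int)) : Decidable (Spec_txt_to_matrix txt key_length out) := by unfold Spec_txt_to_matrix; infer_instance

-- ===== CLAIM (what is proved, stated in full; the proofs are below) =====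
def Claim_equal_txt_to_matrix : Prop := ∀ (txt : String) (key_length : Int), Dom_txt_to_matrix txt key_length → Pre_txt_to_matrix txt key_length → Spec_txt_to_matrix txt key_length (txt_to_matrix txt key_length)

-- ===== LEMMAS AND PROOFS =====

-- common spine: chunk a flat list into width-K rows, padding the last short row with zeros
def pvChunk (K : Nat) : List Int → List (List Int)
  | [] => []
  | a :: t =>
      ((a :: t).take K ++ List.replicate (K - ((a :: t).take K).length) (0 : Int))
        :: pvChunk K (t.drop (K - 1))
termination_by x => x.length
decreasing_by
  simp only [List.length_cons]
  have : (t.drop (K - 1)).length = t.length - (K - 1) := List.length_drop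
  omega

theorem pvChunk_ne_nil (K : Nat) (hK : 1 ≤ K) (l : List Int) (hl : l ≠ []) :
    pvChunk K l = (l.take K ++ List.replicate (K - (l.take K).length) (0 : Int))
      :: pvChunk K (l.drop K) := by
  match l with
  | [] => exact absurd rfl hl
  | a :: t =>
    rw [pvChunk]
    congr 2
    cases K with
    | zero => omega
    | succ m => simp

-- A's accumulator loop builds exactly the code list as a map.
theorem pv_x_eq (cs : List Char) :
    cs.foldl (fun acc c => acc ++ [((c.toNat : Int) - 65)]) [] =
      cs.map (fun c => ((c.toNat : Int) - 65)) := by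
  have h := PySem.List.foldl_append_singleton (cs.map (fun c => ((c.toNat : Int) - 65))) []
  rw [List.foldl_map] at h
  simpa using h

-- A's inner padding loop appends one zero per iteration.
theorem pv_pad_loop (l : List Int) (j : List Int) :
    l.foldl (fun jj _ => jj ++ [(0 : Int)]) j = j ++ List.replicate l.length (0 : Int) := by
  induction l generalizing j with
  | nil => simp
  | cons a l ih =>
    rw [List.foldl_cons, ih, List.length_cons]
    simp [List.append_assoc, List.replicate_succ]

-- range(0, n, k) is empty for 0 ≤ n and negative step k
theorem pv_pyRange_neg_nil (n k : Int) (hn : 0 ≤ n) (hk : k < 0) :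
    PySem.List.pyRange 0 n k = [] := by
  simp only [PySem.List.pyRange]
  have h0 : ¬ (k = 0) := by omega
  have h1 : ¬ (0 < k) := by omega
  have h2 : ¬ (n < 0) := by omega
  simp [h0, h1, h2]

-- A's per-row padding, written as take/replicate
theorem pv_padRow (k : Int) (j : List Int) :
    (if (j.length : Int) < k then
      (PySem.List.pyRange 0 (k - (j.length : Int)) 1).foldl
        (fun jj _ => jj ++ [(0 : Int)]) j
     else j) = j ++ List.replicate (k - (j.length : Int)).toNat (0 : Int) := by
  split_ifs with h
  · rw [pv_pad_loop, PySem.List.length_pyRange_one]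
    congr 2
    omega
  · have : (k - (j.length : Int)).toNat = 0 := by omega
    simp [this]

-- ceiling count splits off one row
theorem pv_count_succ (n k : Int) (hk : 0 < k) (hn : 0 < n) :
    ((n - 0 + k - 1) / k).toNat = ((n - k - 0 + k - 1) / k).toNat + 1 := by
  have e1 : n - 0 + k - 1 = (n - 1) + 1 * k := by ring
  have e2 : n - k - 0 + k - 1 = n - 1 := by ring
  rw [e1, e2, Int.add_mul_ediv_right _ 1 (by omega)]
  have h0 : 0 ≤ (n - 1) / k := Int.ediv_nonneg (by omega) (by omega)
  omega

-- slicing after dropping one chunk = slicing the original one chunk later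
theorem pv_slice_shift (k : Int) (hk : 0 < k) (x : List Int) (i : Int) (hi : 0 ≤ i) :
    PySem.List.slice x (some (k + i)) (some (k + (k + i)))
      = PySem.List.slice (x.drop k.toNat) (some i) (some (k + i)) := by
  rw [PySem.List.slice_toNat _ (by omega) (by omega),
    PySem.List.slice_toNat _ hi (by omega), List.drop_drop]
  congr 1
  · omega
  · congr 1
    omega

-- A's map-over-range-of-slices with per-row padding IS pvChunk
theorem pv_A_chunk (k : Int) (hk : 0 < k) (x : List Int) :
    ((PySem.List.pyRange 0 (x.length : Int) k).map
      (fun i => PySem.List.slice x (some i) (some (k + i)))).map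
        (fun j => j ++ List.replicate (k - (j.length : Int)).toNat (0 : Int))
    = pvChunk k.toNat x := by
  fun_induction pvChunk k.toNat x with
  | case1 =>
    simp [PySem.List.pyRange_of_pos 0 0 hk]
  | case2 a t ih =>
    have hKc : ((k.toNat : Nat) : Int) = k := Int.toNat_of_nonneg (by omega)
    have hK1 : 1 ≤ k.toNat := by omega
    have hn0 : (0 : Int) < (((a :: t).length : Nat) : Int) := by
      simp
    rw [PySem.List.pyRange_of_pos 0 _ hk, if_pos hn0,
      pv_count_succ _ k hk hn0, List.range_succ_eq_map, List.map_cons, List.map_cons,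
      List.map_map, List.map_map, List.map_cons]
    have hd : t.drop (k.toNat - 1) = (a :: t).drop k.toNat := by
      cases hKe : k.toNat with
      | zero => omega
      | succ m => simp
    congr 1
    · -- head row
      dsimp only
      have h0 : ((0 : Int) + k * ((0 : Nat) : Int)) = 0 := by simp
      rw [h0, PySem.List.slice_toNat _ le_rfl (by omega)]
      simp only [Int.toNat_zero, Nat.sub_zero, List.drop_zero, Int.add_zero]
      have hlt : ((a :: t).take k.toNat).length ≤ k.toNat := by
        simp [List.length_take]
      congr 2
      omega
    · -- tail rows
      rw [hd] at ih
      rw [PySem.List.pyRange_of_pos 0 _ hk] at ih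
      rw [hd]
      by_cases hcase : (a :: t).length ≤ k.toNat
      · -- no further rows on either side
        have hdropnil : (a :: t).drop k.toNat = [] := List.drop_eq_nil_of_le hcase
        have hc0 : ((((a :: t).length : Int) - k - 0 + k - 1) / k).toNat = 0 := by
          have : (((a :: t).length : Int) - k - 0 + k - 1) / k = 0 :=
            Int.ediv_eq_zero_of_lt (by omega) (by omega)
          omega
        rw [hc0, hdropnil]
        simp [pvChunk]

      · -- same count, shifted slices
        have hdl : ((((a :: t).drop k.toNat).length : Nat) : Int) = ((a :: t).length : Int) - k := by
          rw [List.length_drop]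
          omega
        rw [hdl, if_pos (by omega)] at ih
        rw [← ih]
        simp only [List.map_map]
        apply List.map_congr_left
        intro j _
        simp only [Function.comp_apply]
        have harg : (0 : Int) + k * ((Nat.succ j : Nat) : Int) = k + ((0 : Int) + k * ((j : Nat) : Int)) := by
          push_cast
          ring
        rw [harg, pv_slice_shift k hk _ _ (by positivity)]

-- B's fold invariant: a running state (rows, row) with row shorter than k finalizes to rows ++ pvChunk
theorem pv_B_chunk (k : Int) (hk : 0 < k) (cs : List Char) (rows : List (List Int))
    (row : List Int) (hrow : (row.length : Int) < k) :
    (if (cs.foldl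
          (fun (s : List (List Int) × List Int) c =>
            if (((s.2 ++ [((c.toNat : Int) - 65)]).length : Int)) = k
            then (s.1 ++ [s.2 ++ [((c.toNat : Int) - 65)]], [])
            else (s.1, s.2 ++ [((c.toNat : Int) - 65)])) (rows, row)).2 = []
     then (cs.foldl
          (fun (s : List (List Int) × List Int) c =>
            if (((s.2 ++ [((c.toNat : Int) - 65)]).length : Int)) = k
            then (s.1 ++ [s.2 ++ [((c.toNat : Int) - 65)]], [])
            else (s.1, s.2 ++ [((c.toNat : Int) - 65)])) (rows, row)).1
     else (cs.foldl
          (fun (s : List (List Int) × List Int) c =>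
            if (((s.2 ++ [((c.toNat : Int) - 65)]).length : Int)) = k
            then (s.1 ++ [s.2 ++ [((c.toNat : Int) - 65)]], [])
            else (s.1, s.2 ++ [((c.toNat : Int) - 65)])) (rows, row)).1
       ++ [(cs.foldl
          (fun (s : List (List Int) × List Int) c =>
            if (((s.2 ++ [((c.toNat : Int) - 65)]).length : Int)) = k
            then (s.1 ++ [s.2 ++ [((c.toNat : Int) - 65)]], [])
            else (s.1, s.2 ++ [((c.toNat : Int) - 65)])) (rows, row)).2
          ++ List.replicate (k - (((cs.foldl
          (fun (s : List (List Int) × List Int) c =>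
            if (((s.2 ++ [((c.toNat : Int) - 65)]).length : Int)) = k
            then (s.1 ++ [s.2 ++ [((c.toNat : Int) - 65)]], [])
            else (s.1, s.2 ++ [((c.toNat : Int) - 65)])) (rows, row)).2.length : Int))).toNat (0 : Int)])
    = rows ++ pvChunk k.toNat (row ++ cs.map (fun c => ((c.toNat : Int) - 65))) := by
  induction cs generalizing rows row with
  | nil =>
    simp only [List.foldl_nil, List.map_nil, List.append_nil]
    match row, hrow with
    | [], _ => simp [pvChunk]
    | a :: t, hrow =>
      rw [if_neg (by simp), pvChunk]
      have hK1 : 1 ≤ k.toNat := by omega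
      have hlen : t.length + 1 < k.toNat := by
        simp only [List.length_cons] at hrow
        omega
      have htake : (a :: t).take k.toNat = a :: t :=
        List.take_of_length_le (by simp; omega)
      have hdrop : t.drop (k.toNat - 1) = [] :=
        List.drop_eq_nil_of_le (by omega)
      rw [htake, hdrop]
      simp only [pvChunk, List.length_cons]
      simp only [List.length_cons] at hrow
      have hcnt : (k - ((t.length + 1 : Nat) : Int)).toNat = k.toNat - (t.length + 1) := by
        omega
      rw [hcnt]
  | cons c cs ih =>
    simp only [List.foldl_cons]
    by_cases h : (((row ++ [((c.toNat : Int) - 65)]).length : Int)) = k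
    · rw [if_pos h, ih (rows ++ [row ++ [((c.toNat : Int) - 65)]]) [] (by simpa using hk)]
      have hlen' : (row ++ [((c.toNat : Int) - 65)]).length = k.toNat := by
        simp only [List.length_append, List.length_singleton] at h ⊢
        omega
      have hchunk := pvChunk_ne_nil k.toNat (by omega)
        ((row ++ [((c.toNat : Int) - 65)]) ++ cs.map (fun c => ((c.toNat : Int) - 65))) (by simp)
      have htake : ((row ++ [((c.toNat : Int) - 65)]) ++ cs.map (fun c => ((c.toNat : Int) - 65))).take k.toNat
          = row ++ [((c.toNat : Int) - 65)] := by
        rw [← hlen', List.take_left]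
      have hdrop : ((row ++ [((c.toNat : Int) - 65)]) ++ cs.map (fun c => ((c.toNat : Int) - 65))).drop k.toNat
          = cs.map (fun c => ((c.toNat : Int) - 65)) := by
        rw [← hlen', List.drop_left]
      rw [List.map_cons,
        show row ++ ((c.toNat : Int) - 65) :: cs.map (fun c => ((c.toNat : Int) - 65))
          = (row ++ [((c.toNat : Int) - 65)]) ++ cs.map (fun c => ((c.toNat : Int) - 65)) by simp,
        hchunk, htake, hdrop, hlen']
      simp [List.append_assoc]
    · rw [if_neg h, ih rows (row ++ [((c.toNat : Int) - 65)])
        (by simp only [List.length_append, List.length_singleton] at h ⊢; push_cast at h ⊢; omega)]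
      congr 2
      simp

-- ===== VERDICT (by name: the statement is the Claim_ definition above) =====
theorem txt_to_matrix_spec : Claim_equal_txt_to_matrix := by
  intro txt k _hdom hkne
  unfold Spec_txt_to_matrix txt_to_matrix txt_to_matrix_alt
  simp only [pv_x_eq]
  rcases lt_trichotomy k 0 with hneg | hzero | hpos
  · rw [pv_pyRange_neg_nil _ _ (by positivity) hneg, if_pos (by omega)]
    simp
  · exact absurd hzero hkne
  · rw [if_neg (by omega)]
    simp only [pv_padRow]
    have hA := pv_A_chunk k hpos ((PySem.Str.upper txt).toList.map (fun c => ((c.toNat : Int) - 65)))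
    rw [hA]
    have hB := pv_B_chunk k hpos (PySem.Str.upper txt).toList [] [] (by simpa using hpos)
    simp only [List.nil_append] at hB
    exact hB.symm
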